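-- pv_equiv track=rewrite | github.com/KonkovDV/OMEGA-MATH | research/active/erdos-straus/experiments/phase1_covering.py | find_decomposition
-- ===== SOURCE A (Python) =====
-- from typing import Any, Optional
--
-- def find_decomposition(n: int, max_denom: int = 10**7) -> Optional[tuple[int, int, int]]:
--     """Find x, y, z > 0 such that 4/n = 1/x + 1/y + 1/z."""
--     # x >= n/4 (ceiling), x <= n (from 4/n >= 1/x requires x >= n/4)
--     x_min = (n + 3) // 4  # ceiling(n/4)
--     x_max = min(n, max_denom)  # 4/n <= 3/x → x <= 3n/4 but we allow larger
--
--     for x in range(x_min, x_max + 1):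
--         # 4/n - 1/x = (4x - n) / (nx)
--         num = 4 * x - n
--         if num <= 0:
--             continue
--         den = n * x
--         # Need 1/y + 1/z = num/den with y <= z
--         # y >= den/num (ceiling), y <= 2*den/num
--         y_min = (den + num - 1) // num  # ceiling(den/num)
--         y_max = min(2 * den // num, max_denom)
--         for y in range(y_min, y_max + 1):
--             # z = den * y / (num * y - den)
--             zy_num = den * y
--             zy_den = num * y - den
--             if zy_den <= 0:
--                 continue
--             if zy_num % zy_den == 0:
--                 z = zy_num // zy_den
--                 if z >= y and z <= max_denom:
--                     return (x, y, z)
--     return None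
-- ===== SOURCE B (Python) =====
-- def _prime_factors(m):
--     fs, d = [], 2
--     while d * d <= m:
--         while m % d == 0:
--             fs.append(d)
--             m //= d
--         d += 1
--     if m > 1:
--         fs.append(m)
--     return fs
--
--
-- def _divisors_of_square(fs, limit):
--     """Sorted divisors of (prod(fs))**2 that are <= limit, fs a list of primes."""
--     divs = {1}
--     for p in fs:
--         divs = {a * q for a in divs for q in (1, p, p * p) if a * q <= limit}
--     return sorted(divs)
--
--
-- def find_decomposition(n, max_denom=10**7):
--     """Find x, y, z > 0 such that 4/n = 1/x + 1/y + 1/z."""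
--     x_min = (n + 3) // 4
--     x_max = min(n, max_denom)
--     n_factors = _prime_factors(n)
--     for x in range(x_min, x_max + 1):
--         num = 4 * x - n
--         if num <= 0:
--             continue
--         den = n * x
--         # d = num*y - den must satisfy 1 <= d, d <= den (y <= z) and
--         # den + d = num*y <= num*max_denom (y <= max_denom)
--         d_max = min(den, num * max_denom - den)
--         if d_max < 1:
--             continue
--         # (num*y - den)(num*z - den) = den^2: take d a divisor of den^2
--         # with d <= d_max, smallest first.
--         for d in _divisors_of_square(n_factors + _prime_factors(x), d_max):
--             if (den + d) % num:
--                 continue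
--             q = den * den // d
--             if (den + q) % num:
--                 continue
--             y = (den + d) // num
--             z = (den + q) // num
--             if y <= max_denom and z <= max_denom:
--                 return (x, y, z)
--     return None
-- ===== Notes on version B (the rewrite author's own statement) =====
-- stated objective: faster
-- what changed: Instead of scanning every candidate y in [ceil(den/num), min(2*den//num, max_denom)], B uses the identity (num*y-den)(num*z-den)=den^2 and enumerates, in increasing order, only the divisors d of den^2 with d <= min(den, num*max_denom-den) (generated from the trial-division factorizations of n, done once, and of x), reading y and z off each divisor; intended as faster (huge on inputs where a decomposition exists; a timing run measured ~2.1x at the largest size where both finished, and both A and B time out on some large no-solution inputs).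
import Mathlib
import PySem

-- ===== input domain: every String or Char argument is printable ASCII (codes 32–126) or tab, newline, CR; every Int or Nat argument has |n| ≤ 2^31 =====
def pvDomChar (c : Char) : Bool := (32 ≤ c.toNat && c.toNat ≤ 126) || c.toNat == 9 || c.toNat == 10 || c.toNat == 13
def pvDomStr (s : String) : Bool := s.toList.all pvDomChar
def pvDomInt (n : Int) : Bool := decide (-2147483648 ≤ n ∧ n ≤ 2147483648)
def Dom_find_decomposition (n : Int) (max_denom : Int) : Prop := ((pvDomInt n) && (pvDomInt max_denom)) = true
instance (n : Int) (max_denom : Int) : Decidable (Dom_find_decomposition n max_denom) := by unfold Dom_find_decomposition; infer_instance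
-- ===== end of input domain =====

-- B replaces A's linear scan over y by an enumeration of the divisors d of den² with
-- d ≤ min(den, num·max_denom − den) (from trial-division factorizations of n, once, and of x),
-- using (num·y−den)(num·z−den) = den²; intended as faster (a timing run measured ~2.1×
-- at the largest size where both versions finished).

-- ===== PORT A =====
def find_decomposition (n : Int) (max_denom : Int) : Option (List Int) :=
  let x_min := PySem.Int.floordiv (n + 3) 4
  let x_max := min n max_denom
  (PySem.List.pyRange x_min (x_max + 1) 1).findSome? (fun x =>
    let num := 4 * x - n
    if num ≤ 0 then none
    else
      let den := n * x
      let y_min := PySem.Int.floordiv (den + num - 1) num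
      let y_max := min (PySem.Int.floordiv (2 * den) num) max_denom
      (PySem.List.pyRange y_min (y_max + 1) 1).findSome? (fun y =>
        let zy_num := den * y
        let zy_den := num * y - den
        if zy_den ≤ 0 then none
        else if PySem.Int.mod zy_num zy_den = 0 then
          let z := PySem.Int.floordiv zy_num zy_den
          if z ≥ y ∧ z ≤ max_denom then some [x, y, z] else none
        else none))

-- ===== PORT B =====
-- _prime_factors: 'while d*d <= m: (divide out d | d += 1)'; hd carries the loop invariant 2 ≤ d (termination)
def pvPFAux (d m : Nat) (hd : 2 ≤ d) : List Nat :=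
  if h : d * d ≤ m then
    if m % d = 0 then d :: pvPFAux d (m / d) hd
    else pvPFAux (d + 1) m (by omega)
  else if 1 < m then [m] else []
termination_by (m, m + 1 - d)
decreasing_by
  · exact Prod.Lex.left _ _ (Nat.div_lt_self (by nlinarith) (by omega))
  · have hdm : d ≤ d * d := Nat.le_mul_of_pos_left d (by omega)
    exact Prod.Lex.right _ (by omega)

def pvPrimeFactors (m : Nat) : List Nat := pvPFAux 2 m (by omega)

-- _divisors_of_square: 'divs = {1}; for p in fs: divs = {a*q for a in divs for q in (1,p,p*p) if a*q <= limit}; return sorted(divs)'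
def pvDivisorsOfSquare (fs : List Nat) (limit : Nat) : List Nat :=
  let divs := fs.foldl
    (fun (s : PySem.Set Nat) p => PySem.Set.ofList (s.flatMap (fun a => [a * 1, a * p, a * (p * p)].filter (fun b => b ≤ limit))))
    (PySem.Set.ofList [1])
  PySem.List.sorted divs (fun x => x) false

def find_decomposition_alt (n : Int) (max_denom : Int) : Option (List Int) :=
  let x_min := PySem.Int.floordiv (n + 3) 4
  let x_max := min n max_denom
  -- n_factors = _prime_factors(n): computed once; n ≥ 1 whenever it is consumed, so n.toNat is exact
  let n_factors := pvPrimeFactors n.toNat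
  (PySem.List.pyRange x_min (x_max + 1) 1).findSome? (fun x =>
    let num := 4 * x - n
    if num ≤ 0 then none
    else
      let den := n * x
      let d_max := min den (num * max_denom - den)
      if d_max < 1 then none
      else
        ((pvDivisorsOfSquare (n_factors ++ pvPrimeFactors x.toNat) d_max.toNat).map (fun (t : Nat) => (t : Int))).findSome? (fun d =>
          if PySem.Int.mod (den + d) num ≠ 0 then none
          else
            let q := PySem.Int.floordiv (den * den) d
            if PySem.Int.mod (den + q) num ≠ 0 then none
            else
              let y := PySem.Int.floordiv (den + d) num
              let z := PySem.Int.floordiv (den + q) num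
              if y ≤ max_denom ∧ z ≤ max_denom then some [x, y, z] else none))

-- ===== PRECONDITION & SPEC =====
def Spec_find_decomposition (n : Int) (max_denom : Int) (out : Option (List Int)) : Prop := out = find_decomposition_alt n max_denom
instance (n : Int) (max_denom : Int) (out : Option (List Int)) : Decidable (Spec_find_decomposition n max_denom out) := by unfold Spec_find_decomposition; infer_instance

-- ===== CLAIM (what is proved, stated in full; the proofs are below) =====
def Claim_equal_find_decomposition : Prop := ∀ (n : Int) (max_denom : Int), Dom_find_decomposition n max_denom → Spec_find_decomposition n max_denom (find_decomposition n max_denom)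

-- ===== LEMMAS AND PROOFS =====

-- first-match characterization of findSome? on a strictly increasing list
theorem pv_findSome?_congr {α β : Type} (l : List α) (f g : α → Option β)
    (h : ∀ x ∈ l, f x = g x) : l.findSome? f = l.findSome? g := by
  induction l with
  | nil => rfl
  | cons a t ih =>
    simp only [List.findSome?_cons, h a (by simp)]
    cases g a with
    | some r => rfl
    | none => exact ih (fun x hx => h x (by simp [hx]))

theorem pv_findSome?_first {β : Type} {f : Int → Option β} {l : List Int}
    (hp : l.Pairwise (· < ·)) {a : Int} {r : β} (ha : a ∈ l) (hfa : f a = some r)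
    (hmin : ∀ b ∈ l, b < a → f b = none) : l.findSome? f = some r := by
  induction l with
  | nil => cases ha
  | cons h t ih =>
    rcases List.mem_cons.mp ha with rfl | hat
    · simp [hfa]
    · have hha : h < a := (List.pairwise_cons.mp hp).1 a hat
      have : f h = none := hmin h (by simp) hha
      simp only [List.findSome?_cons, this]
      exact ih (List.pairwise_cons.mp hp).2 hat (fun b hb => hmin b (by simp [hb]))

theorem pv_findSome?_extract {β : Type} {f : Int → Option β} {l : List Int}
    (hp : l.Pairwise (· < ·)) {r : β} (h : l.findSome? f = some r) :
    ∃ a ∈ l, f a = some r ∧ ∀ b ∈ l, b < a → f b = none := by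
  induction l with
  | nil => simp at h
  | cons x t ih =>
    rcases hfx : f x with _ | r'
    · simp only [List.findSome?_cons, hfx] at h
      obtain ⟨a, hat, hfa, hmin⟩ := ih (List.pairwise_cons.mp hp).2 h
      exact ⟨a, by simp [hat], hfa, fun b hb hba => by
        rcases List.mem_cons.mp hb with rfl | hbt
        · exact hfx
        · exact hmin b hbt hba⟩
    · simp only [List.findSome?_cons, hfx] at h
      refine ⟨x, by simp, by rw [hfx, h], fun b hb hbx => ?_⟩
      rcases List.mem_cons.mp hb with rfl | hbt
      · exact absurd hbx (lt_irrefl _)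
      · exact absurd hbx (not_lt.mpr ((List.pairwise_cons.mp hp).1 b hbt).le)

theorem pv_master {β : Type} {f g : Int → Option β} {l1 l2 : List Int} (ψ φ : Int → Int)
    (h1 : l1.Pairwise (· < ·)) (h2 : l2.Pairwise (· < ·))
    (hfg : ∀ y ∈ l1, f y ≠ none → ψ y ∈ l2 ∧ g (ψ y) = f y)
    (hgf : ∀ d ∈ l2, g d ≠ none → φ d ∈ l1 ∧ f (φ d) = g d ∧ ψ (φ d) = d)
    (hmono : ∀ a b : Int, ψ a < ψ b → a < b) :
    l1.findSome? f = l2.findSome? g := by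
  rcases hc : l1.findSome? f with _ | r
  · rw [List.findSome?_eq_none_iff] at hc
    symm
    rw [List.findSome?_eq_none_iff]
    intro d hd
    by_contra hne
    obtain ⟨hm, hfd, _⟩ := hgf d hd hne
    exact (hne (hfd ▸ hc _ hm)).elim
  · obtain ⟨a, hal, hfa, hmin⟩ := pv_findSome?_extract h1 hc
    obtain ⟨hmem, hga⟩ := hfg a hal (by rw [hfa]; simp)
    symm
    refine pv_findSome?_first h2 hmem (hga.trans hfa) (fun d hd hlt => ?_)
    by_contra hne
    obtain ⟨hm, hfd, hpsi⟩ := hgf d hd hne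
    have : φ d < a := hmono _ _ (by rw [hpsi]; exact hlt)
    exact hne (hfd ▸ hmin _ hm this)

-- trial division emits a prime factorization
theorem pv_pfAux_spec : ∀ (d m : Nat) (hd : 2 ≤ d), 1 ≤ m →
    (∀ k, 2 ≤ k → k < d → ¬ k ∣ m) →
    (pvPFAux d m hd).prod = m ∧ ∀ p ∈ pvPFAux d m hd, p.Prime := by
  intro d m hd
  fun_induction pvPFAux d m hd with
  | case1 d m hd h hmod ih =>
    intro hm hnd
    have hd0 : 0 < d := by omega
    have hdvd : d ∣ m := Nat.dvd_of_mod_eq_zero hmod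
    have hmd1 : 1 ≤ m / d := Nat.one_le_div_iff hd0 |>.mpr (by nlinarith)
    obtain ⟨hprod, hprime⟩ := ih hmd1 (fun k hk2 hkd hkdvd =>
      hnd k hk2 hkd (hkdvd.trans (Nat.div_dvd_of_dvd hdvd)))
    have hdp : d.Prime := by
      rw [Nat.prime_def_lt]
      refine ⟨hd, fun a ha hadvd => ?_⟩
      by_contra ha1
      have ha2 : 2 ≤ a := by
        rcases Nat.eq_zero_or_pos a with rfl | hpos
        · simp at hadvd; omega
        · omega
      exact hnd a ha2 ha (hadvd.trans hdvd)
    refine ⟨?_, ?_⟩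
    · simp only [List.prod_cons, hprod]
      exact Nat.mul_div_cancel' hdvd
    · intro p hp
      rcases List.mem_cons.mp hp with rfl | hpt
      · exact hdp
      · exact hprime p hpt
  | case2 d m hd h hmod ih =>
    intro hm hnd
    refine ih hm (fun k hk2 hkd hkdvd => ?_)
    rcases Nat.lt_succ_iff_lt_or_eq.mp hkd with hlt | rfl
    · exact hnd k hk2 hlt hkdvd
    · exact hmod (Nat.dvd_iff_mod_eq_zero.mp hkdvd)
  | case3 d m hd h hm1 =>
    intro hm hnd
    refine ⟨by simp, fun p hp => ?_⟩
    rw [List.mem_singleton] at hp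
    subst hp
    rw [Nat.prime_def_lt]
    refine ⟨by omega, fun a ha hadvd => ?_⟩
    by_contra ha1
    have ha0 : a ≠ 0 := by rintro rfl; simp at hadvd; omega
    have ha2 : 2 ≤ a := by omega
    have had : d ≤ a := by
      by_contra hlt
      exact hnd a ha2 (by omega) hadvd
    have hqdvd : p / a ∣ p := Nat.div_dvd_of_dvd hadvd
    have hq2 : 2 ≤ p / a := by
      have h1 : 1 ≤ p / a := (Nat.one_le_div_iff (by omega)).mpr (Nat.le_of_dvd (by omega) hadvd)
      have : p / a ≠ 1 := by
        intro he
        have := Nat.div_mul_cancel hadvd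
        rw [he, one_mul] at this
        omega
      omega
    have hqd : d ≤ p / a := by
      by_contra hlt
      exact hnd (p / a) hq2 (by omega) hqdvd
    have : p = a * (p / a) := (Nat.mul_div_cancel' hadvd).symm
    nlinarith
  | case4 d m hd h hm1 =>
    intro hm hnd
    exact ⟨by simp; omega, by simp⟩

theorem pv_primeFactors_spec (m : Nat) (hm : 1 ≤ m) :
    (pvPrimeFactors m).prod = m ∧ ∀ p ∈ pvPrimeFactors m, p.Prime := by
  exact pv_pfAux_spec 2 m (by omega) hm (by omega)

-- one step of the pruned divisor-set fold
theorem pv_step_mem (s : List Nat) (p : Nat) (hp : p.Prime) (M L : Nat) (hM : 1 ≤ M)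
    (hs : ∀ a, a ∈ s ↔ a ∣ M ∧ a ≤ L) :
    ∀ b, b ∈ PySem.Set.ofList (s.flatMap (fun a => [a * 1, a * p, a * (p * p)].filter (fun b => b ≤ L)))
      ↔ b ∣ M * (p * p) ∧ b ≤ L := by
  intro b
  rw [PySem.Set.mem_ofList, List.mem_flatMap]
  constructor
  · rintro ⟨a, ha, hb⟩
    obtain ⟨haM, _⟩ := (hs a).mp ha
    rw [List.mem_filter] at hb
    obtain ⟨hb1, hb2⟩ := hb
    refine ⟨?_, by simpa using hb2⟩
    simp only [List.mem_cons, List.not_mem_nil, or_false] at hb1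
    rcases hb1 with rfl | rfl | rfl
    · exact mul_dvd_mul haM (one_dvd _)
    · exact mul_dvd_mul haM (dvd_mul_right p p)
    · exact mul_dvd_mul haM dvd_rfl
  · rintro ⟨hbdvd, hbL⟩
    obtain ⟨b1, b2, hb1, hb2, rfl⟩ := exists_dvd_and_dvd_of_dvd_mul hbdvd
    have hb2' : b2 ∣ p ^ 2 := by rwa [pow_two]
    obtain ⟨i, hi, rfl⟩ := (Nat.dvd_prime_pow hp).mp hb2'
    have hne : b1 * p ^ i ≠ 0 := by
      rintro h0
      rw [h0] at hbdvd
      have : M * (p * p) = 0 := Nat.eq_zero_of_zero_dvd hbdvd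
      nlinarith [hp.two_le]
    have hb1L : b1 ≤ L := le_trans (Nat.le_of_dvd (by omega) (dvd_mul_right b1 (p ^ i))) hbL
    refine ⟨b1, (hs b1).mpr ⟨hb1, hb1L⟩, ?_⟩
    rw [List.mem_filter]
    constructor
    · interval_cases i <;> simp [pow_succ]
    · interval_cases i <;> simpa [pow_succ, Nat.mul_assoc] using hbL

theorem pv_foldDivs (ps : List Nat) (hps : ∀ p ∈ ps, p.Prime) (L : Nat) :
    ∀ (s : List Nat) (M : Nat), 1 ≤ M → (∀ a, a ∈ s ↔ a ∣ M ∧ a ≤ L) →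
    ∀ b, b ∈ ps.foldl (fun (s : PySem.Set Nat) p => PySem.Set.ofList (s.flatMap (fun a => [a * 1, a * p, a * (p * p)].filter (fun b => b ≤ L)))) s
      ↔ b ∣ M * (ps.map (fun p => p * p)).prod ∧ b ≤ L := by
  induction ps with
  | nil => intro s M hM hs b; simpa using hs b
  | cons p t ih =>
    intro s M hM hs b
    simp only [List.foldl_cons]
    have hp := hps p (by simp)
    have hM' : 1 ≤ M * (p * p) := by nlinarith [hp.two_le]
    rw [ih (fun q hq => hps q (by simp [hq])) _ (M * (p * p)) hM' (pv_step_mem s p hp M L hM hs)]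
    constructor
    · rintro ⟨h1, h2⟩; exact ⟨by rwa [mul_assoc] at h1, h2⟩
    · rintro ⟨h1, h2⟩; exact ⟨by rwa [mul_assoc], h2⟩

theorem pv_fold_ofList (ps : List Nat) (L : Nat) :
    ∀ xs : List Nat, ∃ ys, ps.foldl (fun (s : PySem.Set Nat) p => PySem.Set.ofList (s.flatMap (fun a => [a * 1, a * p, a * (p * p)].filter (fun b => b ≤ L)))) (PySem.Set.ofList xs) = PySem.Set.ofList ys := by
  induction ps with
  | nil => exact fun xs => ⟨xs, rfl⟩
  | cons p t ih => exact fun xs => by rw [List.foldl_cons]; exact ih _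

theorem pv_divisors_spec (fs : List Nat) (hfs : ∀ p ∈ fs, p.Prime) (L : Nat) (hL : 1 ≤ L) :
    (pvDivisorsOfSquare fs L).Pairwise (· < ·) ∧
      ∀ b, b ∈ pvDivisorsOfSquare fs L ↔ b ∣ fs.prod * fs.prod ∧ b ≤ L := by
  unfold pvDivisorsOfSquare
  dsimp only
  obtain ⟨ys, hys⟩ := pv_fold_ofList fs L [1]
  constructor
  · rw [hys]
    exact PySem.List.sorted_ofList_pairwise_lt ys
  · intro b
    rw [PySem.List.mem_sorted]
    rw [pv_foldDivs fs hfs L _ 1 (by omega) (fun a => by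
      rw [PySem.Set.mem_ofList]; simp [Nat.dvd_one]; omega)]
    have : (fs.map (fun p => p * p)).prod = fs.prod * fs.prod := by
      have := List.prod_map_mul (l := fs) (f := fun p => p) (g := fun p => p)
      simpa using this
    rw [this, one_mul]

-- the per-x equivalence of the two inner loops
theorem pv_inner (x num den md : Int) (fs : List Nat)
    (hnum : 1 ≤ num) (hden : 1 ≤ den)
    (hfs : ∀ p ∈ fs, p.Prime) (hprod : (fs.prod : Int) = den) :
    (PySem.List.pyRange (PySem.Int.floordiv (den + num - 1) num)
        (min (PySem.Int.floordiv (2 * den) num) md + 1) 1).findSome? (fun y =>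
      if num * y - den ≤ 0 then none
      else if PySem.Int.mod (den * y) (num * y - den) = 0 then
        if PySem.Int.floordiv (den * y) (num * y - den) ≥ y ∧ PySem.Int.floordiv (den * y) (num * y - den) ≤ md
        then some [x, y, PySem.Int.floordiv (den * y) (num * y - den)] else none
      else none)
    = (if min den (num * md - den) < 1 then none
       else ((pvDivisorsOfSquare fs (min den (num * md - den)).toNat).map (fun (t : Nat) => (t : Int))).findSome? (fun d =>
        if PySem.Int.mod (den + d) num ≠ 0 then none
        else if PySem.Int.mod (den + PySem.Int.floordiv (den * den) d) num ≠ 0 then none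
        else if PySem.Int.floordiv (den + d) num ≤ md ∧ PySem.Int.floordiv (den + PySem.Int.floordiv (den * den) d) num ≤ md
          then some [x, PySem.Int.floordiv (den + d) num, PySem.Int.floordiv (den + PySem.Int.floordiv (den * den) d) num] else none)) := by
  have hnum0 : (0 : Int) < num := by omega
  have hden0 : (0 : Int) < den := by omega
  -- ceiling bounds for y_min
  have hceil := PySem.Int.floordiv_mul_add_mod (den + num - 1) num
  have hmod1 := PySem.Int.mod_nonneg (den + num - 1) hnum0
  have hmod2 := PySem.Int.mod_lt (den + num - 1) hnum0
  set ym := PySem.Int.floordiv (den + num - 1) num with hymdef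
  have hymub : ym * num ≤ den + num - 1 := by linarith
  have hymlb : den ≤ ym * num := by linarith
  set dmax := min den (num * md - den) with hdmaxdef
  -- the valid y of A's scan yield d = num*y - den with 1 ≤ d ≤ dmax and d ∣ den²
  have hAside : ∀ y : Int, ym ≤ y → y < min (PySem.Int.floordiv (2 * den) num) md + 1 →
      ∀ {r : List Int},
      (if num * y - den ≤ 0 then none
       else if PySem.Int.mod (den * y) (num * y - den) = 0 then
         if PySem.Int.floordiv (den * y) (num * y - den) ≥ y ∧ PySem.Int.floordiv (den * y) (num * y - den) ≤ md
         then some [x, y, PySem.Int.floordiv (den * y) (num * y - den)] else none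
       else none) = some r →
      1 ≤ num * y - den ∧ num * y - den ≤ dmax ∧ (num * y - den) ∣ den * den ∧
        (num * y - den) * (num * (PySem.Int.floordiv (den * y) (num * y - den)) - den) = den * den ∧
        1 ≤ y ∧ y ≤ md ∧ PySem.Int.floordiv (den * y) (num * y - den) * (num * y - den) = den * y := by
    intro y hy1 hy2 r hne
    have hymd : y ≤ md := by
      have := min_le_right (PySem.Int.floordiv (2 * den) num) md; linarith
    split_ifs at hne with hd0 hmod hcond
    set d := num * y - den with hddef
    set z := PySem.Int.floordiv (den * y) (num * y - den) with hzdef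
    have hd1 : 1 ≤ d := by omega
    have hyd : num * y = den + d := by omega
    have hdvd1 : (num * y - den) ∣ den * y := (PySem.Int.mod_eq_zero_iff_dvd _ _).mp hmod
    have hz : z * d = den * y := by
      rw [hzdef, PySem.Int.floordiv_eq_ediv_of_pos (by omega)]
      exact Int.ediv_mul_cancel hdvd1
    have hy0 : 1 ≤ y := by
      nlinarith [mul_le_mul_of_nonneg_left hy1 (le_of_lt hnum0)]
    have hzy : z ≥ y := hcond.1
    have hdden : d ≤ den := by nlinarith [mul_le_mul_of_nonneg_right hzy (show (0:Int) ≤ d by omega)]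
    have hkey : d * (num * z - den) = den * den := by linear_combination num * hz + den * hyd
    have hdmd : d ≤ num * md - den := by
      have := mul_le_mul_of_nonneg_left hymd (le_of_lt hnum0)
      omega
    exact ⟨hd1, le_min hdden hdmd, ⟨num * z - den, hkey.symm⟩, hkey, hy0, hymd, hz⟩
  by_cases hskip : dmax < 1
  · rw [if_pos hskip, List.findSome?_eq_none_iff]
    intro y hy
    rw [PySem.List.mem_pyRange_one] at hy
    rcases hres : (if num * y - den ≤ 0 then none
       else if PySem.Int.mod (den * y) (num * y - den) = 0 then
         if PySem.Int.floordiv (den * y) (num * y - den) ≥ y ∧ PySem.Int.floordiv (den * y) (num * y - den) ≤ md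
         then some [x, y, PySem.Int.floordiv (den * y) (num * y - den)] else none
       else none) with _ | r
    · rfl
    · obtain ⟨hd1, hdm2, _⟩ := hAside y hy.1 hy.2 hres
      omega
  · rw [if_neg hskip]
    have hdmax1 : 1 ≤ dmax := by omega
    have hmtn : ((dmax.toNat : Int)) = dmax := Int.toNat_of_nonneg (by omega)
    have hPN : 1 ≤ fs.prod := by
      by_contra h0
      have : fs.prod = 0 := by omega
      rw [this] at hprod
      omega
    obtain ⟨hdp, hdm⟩ := pv_divisors_spec fs hfs dmax.toNat (by omega)
    have hmapp : ((pvDivisorsOfSquare fs dmax.toNat).map (fun (t : Nat) => (t : Int))).Pairwise (· < ·) :=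
      List.Pairwise.map _ (fun a b (h : a < b) => by exact_mod_cast h) hdp
    -- membership characterization of the divisor list
    have hmem2 : ∀ d : Int, (d ∈ (pvDivisorsOfSquare fs dmax.toNat).map (fun (t : Nat) => (t : Int)))
        ↔ 1 ≤ d ∧ d ≤ dmax ∧ d ∣ den * den := by
      intro d
      constructor
      · intro hdmem
        obtain ⟨d0, hd0, rfl⟩ := List.mem_map.mp hdmem
        obtain ⟨hdvd0, hdle0⟩ := (hdm d0).mp hd0
        have hpos : 0 < d0 := Nat.pos_of_dvd_of_pos hdvd0 (by positivity)
        refine ⟨by exact_mod_cast hpos, by rw [← hmtn]; exact_mod_cast hdle0, ?_⟩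
        have := Int.natCast_dvd_natCast.mpr hdvd0
        rwa [Nat.cast_mul, hprod] at this
      · rintro ⟨hd1, hdle, hdvd⟩
        have hd0 : ((d.toNat : Int)) = d := Int.toNat_of_nonneg (by omega)
        have hdvd0 : d.toNat ∣ fs.prod * fs.prod := by
          rw [← Int.natCast_dvd_natCast, Nat.cast_mul, hprod, hd0]
          exact hdvd
        have hdle0 : d.toNat ≤ dmax.toNat := by omega
        exact List.mem_map.mpr ⟨d.toNat, (hdm d.toNat).mpr ⟨hdvd0, hdle0⟩, hd0⟩
    apply pv_master (fun y => num * y - den) (fun d => PySem.Int.floordiv (den + d) num)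
      (PySem.List.pairwise_lt_pyRange_one _ _) hmapp
    · -- hfg
      intro y hy hne
      rw [PySem.List.mem_pyRange_one] at hy
      rcases hres : (if num * y - den ≤ 0 then none
         else if PySem.Int.mod (den * y) (num * y - den) = 0 then
           if PySem.Int.floordiv (den * y) (num * y - den) ≥ y ∧ PySem.Int.floordiv (den * y) (num * y - den) ≤ md
           then some [x, y, PySem.Int.floordiv (den * y) (num * y - den)] else none
         else none) with _ | r
      · exact absurd hres hne
      · obtain ⟨hd1, hdmx, hdvd2, hkey, hy0, hymd, hz⟩ := hAside y hy.1 hy.2 hres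
        set d := num * y - den with hddef
        set z := PySem.Int.floordiv (den * y) (num * y - den) with hzdef
        have hyd : num * y = den + d := by omega
        have hq : PySem.Int.floordiv (den * den) d = num * z - den := by
          rw [PySem.Int.floordiv_eq_ediv_of_pos (by omega), ← hkey]
          exact Int.mul_ediv_cancel_left _ (by omega)
        refine ⟨(hmem2 d).mpr ⟨hd1, hdmx, hdvd2⟩, ?_⟩
        have hmodd : PySem.Int.mod (den + d) num = 0 :=
          (PySem.Int.mod_eq_zero_iff_dvd _ _).mpr ⟨y, by omega⟩
        have hmodq : PySem.Int.mod (den + (num * z - den)) num = 0 :=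
          (PySem.Int.mod_eq_zero_iff_dvd _ _).mpr ⟨z, by ring⟩
        have hyy : PySem.Int.floordiv (den + d) num = y := by
          rw [← hyd, PySem.Int.floordiv_eq_ediv_of_pos hnum0]
          exact Int.mul_ediv_cancel_left _ (by omega)
        have hzz : PySem.Int.floordiv (den + (num * z - den)) num = z := by
          rw [show den + (num * z - den) = num * z by ring, PySem.Int.floordiv_eq_ediv_of_pos hnum0]
          exact Int.mul_ediv_cancel_left _ (by omega)
        -- both sides evaluate to some [x, y, z]
        split_ifs at hres with hd0 hmod hcond
        rw [hq, if_neg (not_not.mpr hmodd), if_neg (not_not.mpr hmodq), hyy, hzz,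
          if_pos ⟨hymd, hcond.2⟩, ← hres]
    · -- hgf
      intro d hd hne
      obtain ⟨hd1, hdmx, hdvd⟩ := (hmem2 d).mp hd
      have hdden : d ≤ den := le_trans hdmx (min_le_left _ _)
      split_ifs at hne with hA hB hC <;> try exact absurd rfl hne
      have hnd : num ∣ den + d := (PySem.Int.mod_eq_zero_iff_dvd _ _).mp (not_not.mp hA)
      set y := PySem.Int.floordiv (den + d) num with hydef
      set q := PySem.Int.floordiv (den * den) d with hqdef
      set z := PySem.Int.floordiv (den + q) num with hzdef
      have hyd : num * y = den + d := by
        rw [hydef, PySem.Int.floordiv_eq_ediv_of_pos hnum0]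
        exact Int.mul_ediv_cancel' hnd
      have hqd : d * q = den * den := by
        rw [hqdef, PySem.Int.floordiv_eq_ediv_of_pos (by omega)]
        exact Int.mul_ediv_cancel' hdvd
      have hnq : num ∣ den + q := (PySem.Int.mod_eq_zero_iff_dvd _ _).mp (not_not.mp hB)
      have hzq : num * z = den + q := by
        rw [hzdef, PySem.Int.floordiv_eq_ediv_of_pos hnum0]
        exact Int.mul_ediv_cancel' hnq
      have hy0 : 1 ≤ y := by nlinarith
      have hpsi : num * y - den = d := by linarith
      have hdy : den * y = z * d := by
        have hcan : num * (den * y) = num * (z * d) := by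
          linear_combination den * hyd - d * hzq - hqd
        exact mul_left_cancel₀ (by omega) hcan
      refine ⟨?_, ?_, hpsi⟩
      · rw [PySem.List.mem_pyRange_one]
        constructor
        · by_contra hlt
          have h1 : y ≤ ym - 1 := by omega
          have h2 : num * y ≤ num * (ym - 1) := mul_le_mul_of_nonneg_left h1 (by omega)
          nlinarith
        · have hu1 : y ≤ PySem.Int.floordiv (2 * den) num := by
            rw [PySem.Int.le_floordiv_iff_mul_le hnum0]
            nlinarith
          have := le_min hu1 hC.1
          linarith
      · -- f y = g d
        have hzgey : z ≥ y := by
          have h1 : y * d ≤ z * d := by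
            rw [← hdy]
            nlinarith
          exact le_of_mul_le_mul_right h1 (by omega)
        have hmody : PySem.Int.mod (den * y) (num * y - den) = 0 := by
          rw [hpsi]
          exact (PySem.Int.mod_eq_zero_iff_dvd _ _).mpr ⟨z, by linarith [hdy]⟩
        have hzy' : PySem.Int.floordiv (den * y) (num * y - den) = z := by
          rw [hpsi, hdy, PySem.Int.floordiv_eq_ediv_of_pos (by omega)]
          exact Int.mul_ediv_cancel _ (by omega)
        rw [if_neg (by omega), if_pos hmody, hzy', if_pos ⟨hzgey, hC.2⟩, if_neg hA, if_neg hB, if_pos hC]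
    · -- monotone
      intro a b h
      exact lt_of_mul_lt_mul_left (by linarith) (by omega : (0:Int) ≤ num)

-- ===== VERDICT (by name: the statement is the Claim_ definition above) =====
theorem find_decomposition_spec : Claim_equal_find_decomposition := by
  intro n md _
  unfold Spec_find_decomposition find_decomposition find_decomposition_alt
  dsimp only
  apply pv_findSome?_congr
  intro x hx
  rw [PySem.List.mem_pyRange_one] at hx
  by_cases hnum : 4 * x - n ≤ 0
  · simp [hnum]
  · rw [if_neg hnum, if_neg hnum]
    have hxm : x ≤ min n md := by omega
    have hxn : x ≤ n := le_trans hxm (min_le_left n md)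
    have hx1 : 1 ≤ x := by omega
    have hn1 : 1 ≤ n := by omega
    have hden : 1 ≤ n * x := by nlinarith
    have hnn : ((n.toNat : Int)) = n := Int.toNat_of_nonneg (by omega)
    have hxx : ((x.toNat : Int)) = x := Int.toNat_of_nonneg (by omega)
    obtain ⟨hpn, hprn⟩ := pv_primeFactors_spec n.toNat (by omega)
    obtain ⟨hpx, hprx⟩ := pv_primeFactors_spec x.toNat (by omega)
    have hfs : ∀ p ∈ pvPrimeFactors n.toNat ++ pvPrimeFactors x.toNat, p.Prime := by
      intro p hp
      rcases List.mem_append.mp hp with h | h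
      · exact hprn p h
      · exact hprx p h
    have hprod : (((pvPrimeFactors n.toNat ++ pvPrimeFactors x.toNat).prod : Nat) : Int) = n * x := by
      rw [List.prod_append, hpn, hpx]
      push_cast
      rw [hnn, hxx]
    exact pv_inner x (4 * x - n) (n * x) md (pvPrimeFactors n.toNat ++ pvPrimeFactors x.toNat)
      (by omega) hden hfs hprod
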